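-- pv_equiv track=rewrite | github.com/GameMaker2k/PyWWW-Get | dnsd.py | _keytag_from_dnskey_rdata
-- ===== SOURCE A (Python) =====
-- def _byte_at(b, i):
--     v = b[i]
--     return v if isinstance(v, int) else ord(v)
--
-- def _keytag_from_dnskey_rdata(rdata):
--     # RFC4034 key tag
--     ac = 0
--     for i in range(len(rdata)):
--         v = _byte_at(rdata, i)
--         if i & 1:
--             ac += v
--         else:
--             ac += v << 8
--     ac += (ac >> 16) & 0xFFFF
--     return ac & 0xFFFF
-- ===== SOURCE B (Python) =====
-- def _byte_at(b, i):
--     v = b[i]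
--     return v if isinstance(v, int) else ord(v)
--
-- def _keytag_from_dnskey_rdata(rdata):
--     # RFC4034 key tag: sum 16-bit big-endian words (two bytes per step),
--     # padding an odd trailing byte as the high half, then fold the carry.
--     n = len(rdata)
--     ac = 0
--     i = 0
--     while i + 1 < n:
--         ac += (_byte_at(rdata, i) << 8) + _byte_at(rdata, i + 1)
--         i += 2
--     if i < n:
--         ac += _byte_at(rdata, i) << 8
--     ac += (ac >> 16) & 0xFFFF
--     return ac & 0xFFFF
-- ===== Notes on version B (the rewrite author's own statement) =====
-- stated objective: alternative
-- what changed: Replaces A's per-byte loop with an even/odd parity branch by a while loop that consumes two bytes per step, accumulating big-endian 16-bit words (odd trailing byte padded as the high half), then applies the same carry fold.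
import Mathlib
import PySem

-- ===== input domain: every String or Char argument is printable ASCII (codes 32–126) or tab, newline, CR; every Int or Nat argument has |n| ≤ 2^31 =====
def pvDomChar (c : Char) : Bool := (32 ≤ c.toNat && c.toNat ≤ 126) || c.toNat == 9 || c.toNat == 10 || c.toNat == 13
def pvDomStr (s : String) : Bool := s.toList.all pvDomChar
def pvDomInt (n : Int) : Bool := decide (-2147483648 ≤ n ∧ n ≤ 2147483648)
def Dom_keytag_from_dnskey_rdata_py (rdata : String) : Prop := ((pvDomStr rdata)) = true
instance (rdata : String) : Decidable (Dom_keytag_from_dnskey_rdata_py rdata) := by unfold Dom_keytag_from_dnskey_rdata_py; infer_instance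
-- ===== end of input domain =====

-- B replaces A's per-byte loop with an even/odd branch by a two-bytes-per-step
-- 16-bit word accumulation (alternative decomposition, same cost); return value only.

-- ===== PORT A =====
-- _byte_at: b[i] then ord; in A the index is always in range, so the total pyGetD form is exact.
def pyByteAtA (cs : List Char) (i : Int) : Int :=
  ((PySem.List.pyGetD cs i ' ').toNat : Int)

def keytag_from_dnskey_rdata_py (rdata : String) : Int :=
  let cs := rdata.toList
  let ac : Int := (PySem.List.pyRange 0 (cs.length : Int) 1).foldl
    (fun ac i =>
      let v := pyByteAtA cs i
      if PySem.Int.band i 1 ≠ 0 then ac + v else ac + (v <<< (8 : Nat))) 0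
  let ac := ac + PySem.Int.band (ac >>> (16 : Nat)) 0xFFFF
  PySem.Int.band ac 0xFFFF

-- ===== PORT B =====
def pyByteAtB (cs : List Char) (i : Int) : Int :=
  ((PySem.List.pyGetD cs i ' ').toNat : Int)

-- the while loop of B: i advances by 2, accumulating big-endian 16-bit words
def wordsLoopB (cs : List Char) (i : Nat) (ac : Int) : Int :=
  if i + 1 < cs.length then
    wordsLoopB cs (i + 2) (ac + ((pyByteAtB cs i <<< (8 : Nat)) + pyByteAtB cs (i + 1)))
  else if i < cs.length then
    ac + (pyByteAtB cs i <<< (8 : Nat))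
  else ac
termination_by cs.length - i

def keytag_from_dnskey_rdata_py_alt (rdata : String) : Int :=
  let cs := rdata.toList
  let ac := wordsLoopB cs 0 0
  let ac := ac + PySem.Int.band (ac >>> (16 : Nat)) 0xFFFF
  PySem.Int.band ac 0xFFFF

-- ===== PRECONDITION & SPEC =====
def Spec_keytag_from_dnskey_rdata_py (rdata : String) (out : Int) : Prop := out = keytag_from_dnskey_rdata_py_alt rdata
instance (rdata : String) (out : Int) : Decidable (Spec_keytag_from_dnskey_rdata_py rdata out) := by unfold Spec_keytag_from_dnskey_rdata_py; infer_instance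

-- ===== CLAIM (what is proved, stated in full; the proofs are below) =====
def Claim_equal_keytag_from_dnskey_rdata_py : Prop := ∀ (rdata : String), Dom_keytag_from_dnskey_rdata_py rdata → Spec_keytag_from_dnskey_rdata_py rdata (keytag_from_dnskey_rdata_py rdata)

-- ===== LEMMAS AND PROOFS =====

theorem band_one_natCast (n : Nat) : PySem.Int.band (n : Int) 1 = ((n % 2 : Nat) : Int) := by
  rw [← Nat.cast_one, PySem.Int.band_natCast, Nat.and_one_is_mod]

theorem keytag_aux (cs : List Char) (i : Nat) (ac : Int) (hpar : i % 2 = 0) :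
    (PySem.List.pyRange (i : Int) (cs.length : Int) 1).foldl
      (fun ac j =>
        let v := pyByteAtA cs j
        if PySem.Int.band j 1 ≠ 0 then ac + v else ac + (v <<< (8 : Nat))) ac
    = wordsLoopB cs i ac := by
  rw [wordsLoopB]
  by_cases h2 : i + 1 < cs.length
  · have h1 : i < cs.length := by omega
    rw [PySem.List.pyRange_one_cons (by exact_mod_cast h1)]
    rw [show ((i : Int) + 1) = ((i + 1 : Nat) : Int) by push_cast; ring]
    rw [PySem.List.pyRange_one_cons (by exact_mod_cast h2)]
    rw [show (((i + 1 : Nat) : Int) + 1) = ((i + 2 : Nat) : Int) by push_cast; ring]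
    simp only [List.foldl_cons]
    rw [keytag_aux cs (i + 2) _ (by omega)]
    simp only [band_one_natCast, hpar, show (i + 1) % 2 = 1 by omega]
    simp [pyByteAtA, pyByteAtB, add_assoc, h2]
  · by_cases h1 : i < cs.length
    · have hn : cs.length = i + 1 := by omega
      rw [PySem.List.pyRange_one_cons (by exact_mod_cast h1)]
      rw [show ((i : Int) + 1) = ((cs.length : Nat) : Int) by rw [hn]; push_cast; ring]
      rw [PySem.List.pyRange_one_eq_nil le_rfl]
      simp only [List.foldl_cons, List.foldl_nil, band_one_natCast, hpar]
      simp [h1, h2, pyByteAtA, pyByteAtB]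
    · rw [PySem.List.pyRange_one_eq_nil (by exact_mod_cast Nat.le_of_not_lt h1)]
      simp [h1, h2]
termination_by cs.length - i

-- ===== VERDICT (by name: the statement is the Claim_ definition above) =====
theorem keytag_from_dnskey_rdata_py_spec : Claim_equal_keytag_from_dnskey_rdata_py := by
  intro rdata _
  have h := keytag_aux rdata.toList 0 0 rfl
  rw [show (((0 : Nat)) : Int) = (0 : Int) from rfl] at h
  simp only [Spec_keytag_from_dnskey_rdata_py, keytag_from_dnskey_rdata_py, keytag_from_dnskey_rdata_py_alt]
  rw [h]
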